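-- pv_equiv track=rewrite | github.com/Arnav-Purushotam-CUBoulder/firefly-pipeline | tools for scaling species/patch_classification_models_dataset_ingestor.py | _non_firefly_frame_ranges
-- ===== SOURCE A (Python) =====
-- from typing import Any, Dict, Iterable, Iterator, List, Optional, Sequence, Set, Tuple
--
-- def _non_firefly_frame_ranges(total_frames: int, firefly_frames: Sequence[int]) -> List[Tuple[int, int]]:
--     total_frames = int(total_frames)
--     if total_frames <= 0:
--         return []
--     forbidden = sorted({int(t) for t in firefly_frames if 0 <= int(t) < total_frames})
--     out: List[Tuple[int, int]] = []
--     prev = -1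
--     for t in forbidden:
--         if t > prev + 1:
--             out.append((prev + 1, t - 1))
--         prev = t
--     if prev < total_frames - 1:
--         out.append((prev + 1, total_frames - 1))
--     return out
-- ===== SOURCE B (Python) =====
-- from typing import List, Sequence, Tuple
--
-- def _non_firefly_frame_ranges(total_frames: int, firefly_frames: Sequence[int]) -> List[Tuple[int, int]]:
--     total_frames = int(total_frames)
--     if total_frames <= 0:
--         return []
--     ts = [int(t) for t in firefly_frames if 0 <= int(t) < total_frames]
--     # divide and conquer on the value space: carve a pivot frame out of [lo, hi]
--     # and recurse on both sides (explicit stack, left side on top => ascending output)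
--     out: List[Tuple[int, int]] = []
--     stack = [(0, total_frames - 1, ts)]
--     while stack:
--         lo, hi, ts = stack.pop()
--         if lo > hi:
--             continue
--         if not ts:
--             out.append((lo, hi))
--             continue
--         p = ts[len(ts) // 2]
--         stack.append((p + 1, hi, [t for t in ts if t > p]))
--         stack.append((lo, p - 1, [t for t in ts if t < p]))
--     return out
-- ===== Notes on version B (the rewrite author's own statement) =====
-- stated objective: alternative
-- what changed: B never sorts and never scans gaps between consecutive sorted frames: it starts from the full range [0, total_frames-1] and, quicksort-style, picks the middle listed frame as a pivot, carves it out of the range, partitions the remaining frames, and recurses on the two sides via an explicit stack (left half pushed last, so output comes out ascending).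
import Mathlib
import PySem

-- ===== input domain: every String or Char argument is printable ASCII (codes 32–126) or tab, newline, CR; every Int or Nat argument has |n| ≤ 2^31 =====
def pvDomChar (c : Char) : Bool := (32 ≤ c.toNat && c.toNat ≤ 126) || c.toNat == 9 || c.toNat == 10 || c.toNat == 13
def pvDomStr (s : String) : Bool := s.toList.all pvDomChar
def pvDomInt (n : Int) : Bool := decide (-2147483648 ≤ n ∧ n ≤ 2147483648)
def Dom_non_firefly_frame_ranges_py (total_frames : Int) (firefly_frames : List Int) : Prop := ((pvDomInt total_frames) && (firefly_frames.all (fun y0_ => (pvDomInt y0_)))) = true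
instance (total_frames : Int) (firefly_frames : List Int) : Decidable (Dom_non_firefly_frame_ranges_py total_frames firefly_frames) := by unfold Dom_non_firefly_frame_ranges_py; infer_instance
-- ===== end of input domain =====

-- B replaces A's sort-then-gap-scan by divide and conquer on the value space:
-- carve each pivot frame out of the current range and recurse on both sides (alternative decomposition).

-- ===== PORT A =====
-- A's loop body: state (out, prev); emit a gap when t > prev + 1
def pvAStep (st : List (Int × Int) × Int) (t : Int) : List (Int × Int) × Int :=
  (if st.2 + 1 < t then st.1 ++ [(st.2 + 1, t - 1)] else st.1, t)

-- A's code after the loop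
def pvAFinish (n : Int) (st : List (Int × Int) × Int) : List (Int × Int) :=
  if st.2 < n - 1 then st.1 ++ [(st.2 + 1, n - 1)] else st.1

def non_firefly_frame_ranges_py (total_frames : Int) (firefly_frames : List Int) : List (Int × Int) :=
  if total_frames ≤ 0 then []
  else
    let forbidden := PySem.List.sorted
      (PySem.Set.ofList (firefly_frames.filter (fun t => decide (0 ≤ t) && decide (t < total_frames))))
      (fun x => x) false
    pvAFinish total_frames (forbidden.foldl pvAStep ([], -1))

-- ===== PORT B =====
-- termination helpers for pvCarve: both partition halves together are shorter than ts (the pivot drops out)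
lemma pvPartLe (p : Int) : ∀ l : List Int,
    (l.filter (fun t => decide (t < p))).length + (l.filter (fun t => decide (p < t))).length ≤ l.length := by
  intro l
  induction l with
  | nil => simp
  | cons a l ih =>
    simp only [List.filter_cons]
    rcases lt_trichotomy a p with h | h | h
    · simp [h, show ¬ p < a by omega]; omega
    · simp [show ¬ a < p by omega, show ¬ p < a by omega]; omega
    · simp [show ¬ a < p by omega, h]; omega

lemma pvPartLen (p : Int) : ∀ ts : List Int, p ∈ ts →
    (ts.filter (fun t => decide (t < p))).length + (ts.filter (fun t => decide (p < t))).length < ts.length := by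
  intro ts
  induction ts with
  | nil => simp
  | cons a l ih =>
    intro hp
    by_cases hap : a = p
    · subst hap
      have := pvPartLe a l
      simp only [List.filter_cons]
      simp
      omega
    · have hpl : p ∈ l := by
        rcases List.mem_cons.mp hp with h | h
        · exact absurd h.symm hap
        · exact h
      have := ih hpl
      simp only [List.filter_cons]
      rcases lt_trichotomy a p with h | h | h
      · simp [h, show ¬ p < a by omega]; omega
      · omega
      · simp [show ¬ a < p by omega, h]; omega

-- B's while loop over the explicit stack (top of the Python stack = head of the list)
def pvCarve (stack : List (Int × Int × List Int)) (out : List (Int × Int)) : List (Int × Int) :=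
  match stack with
  | [] => out
  | (lo, hi, ts) :: st =>
    if lo > hi then pvCarve st out
    else if h : ts = [] then pvCarve st (out ++ [(lo, hi)])
    else
      let p := ts.getD (ts.length / 2) 0
      pvCarve ((lo, p - 1, ts.filter (fun t => decide (t < p))) ::
               (p + 1, hi, ts.filter (fun t => decide (p < t))) :: st) out
termination_by (stack.map (fun e => 2 * e.2.2.length + 1)).sum
decreasing_by
  · simp
  · simp
  · have hlen : 0 < ts.length := List.length_pos_iff.mpr h
    have hmem : ts.getD (ts.length / 2) 0 ∈ ts := by
      rw [List.getD_eq_getElem ts 0 (by omega : ts.length / 2 < ts.length)]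
      exact List.getElem_mem _
    have hpart := pvPartLen (ts.getD (ts.length / 2) 0) ts hmem
    simp only [List.map_cons, List.sum_cons, List.length_unattach,
      ← List.countP_eq_length_filter] at *
    rw [List.countP_attach (p := fun t => decide (t < ts.getD (ts.length / 2) 0)),
        List.countP_attach (p := fun t => decide (ts.getD (ts.length / 2) 0 < t))]
    omega

def non_firefly_frame_ranges_py_alt (total_frames : Int) (firefly_frames : List Int) : List (Int × Int) :=
  if total_frames ≤ 0 then []
  else
    let ts := firefly_frames.filter (fun t => decide (0 ≤ t) && decide (t < total_frames))
    pvCarve [(0, total_frames - 1, ts)] []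

-- ===== PRECONDITION & SPEC =====
def Spec_non_firefly_frame_ranges_py (total_frames : Int) (firefly_frames : List Int) (out : List (Int × Int)) : Prop := out = non_firefly_frame_ranges_py_alt total_frames firefly_frames
instance (total_frames : Int) (firefly_frames : List Int) (out : List (Int × Int)) : Decidable (Spec_non_firefly_frame_ranges_py total_frames firefly_frames out) := by unfold Spec_non_firefly_frame_ranges_py; infer_instance

-- ===== CLAIM =====
def Claim_equal_non_firefly_frame_ranges_py : Prop := ∀ (total_frames : Int) (firefly_frames : List Int), Dom_non_firefly_frame_ranges_py total_frames firefly_frames → Spec_non_firefly_frame_ranges_py total_frames firefly_frames (non_firefly_frame_ranges_py total_frames firefly_frames)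

-- ===== LEMMAS AND PROOFS =====

-- the complement ranges of a strictly increasing pts inside (prev, n)
def pvGaps (prev n : Int) : List Int → List (Int × Int)
  | [] => if prev < n - 1 then [(prev + 1, n - 1)] else []
  | t :: ts => (if prev + 1 < t then [(prev + 1, t - 1)] else []) ++ pvGaps t n ts

-- A's scan computes pvGaps
lemma pvAFold (n : Int) : ∀ (pts : List Int) (prev : Int) (out : List (Int × Int)),
    pvAFinish n (pts.foldl pvAStep (out, prev)) = out ++ pvGaps prev n pts := by
  intro pts
  induction pts with
  | nil =>
    intro prev out
    by_cases h : prev < n - 1 <;> simp [pvAFinish, pvGaps, List.foldl, h]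
  | cons t ts ih =>
    intro prev out
    rw [List.foldl_cons,
        show pvAStep (out, prev) t
          = ((if prev + 1 < t then out ++ [(prev + 1, t - 1)] else out), t) from rfl, ih]
    by_cases h : prev + 1 < t <;> simp [pvGaps, h]

-- pvGaps splits at any element of the list
lemma pvGaps_append (n : Int) : ∀ (L : List Int) (prev p : Int) (R : List Int),
    pvGaps prev n (L ++ p :: R) = pvGaps prev p L ++ pvGaps p n R := by
  intro L
  induction L with
  | nil =>
    intro prev p R
    by_cases h : prev + 1 < p
    · simp [pvGaps, h, show prev < p - 1 by omega]
    · simp [pvGaps, h, show ¬ prev < p - 1 by omega]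
  | cons t ts ih =>
    intro prev p R
    simp only [List.cons_append, pvGaps, ih]
    by_cases h : prev + 1 < t <;> simp [h]

-- the sorted deduplicated list splits at a pivot p ∈ ts into the sorted halves
lemma pvSortedSplit (ts : List Int) (p : Int) (hp : p ∈ ts) :
    PySem.List.sorted (PySem.Set.ofList ts) (fun x => x) false =
      PySem.List.sorted (PySem.Set.ofList (ts.filter (fun t => decide (t < p)))) (fun x => x) false
        ++ p :: PySem.List.sorted (PySem.Set.ofList (ts.filter (fun t => decide (p < t)))) (fun x => x) false := by
  set L := PySem.List.sorted (PySem.Set.ofList (ts.filter (fun t => decide (t < p)))) (fun x => x) false with hL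
  set R := PySem.List.sorted (PySem.Set.ofList (ts.filter (fun t => decide (p < t)))) (fun x => x) false with hR
  have hmemL : ∀ x ∈ L, x ∈ ts ∧ x < p := by
    intro x hx
    have := (PySem.Set.mem_ofList _ _).mp ((PySem.List.mem_sorted _ _ _ _).mp (hL ▸ hx))
    have := List.mem_filter.mp this
    constructor
    · exact this.1
    · simpa using this.2
  have hmemR : ∀ x ∈ R, x ∈ ts ∧ p < x := by
    intro x hx
    have := (PySem.Set.mem_ofList _ _).mp ((PySem.List.mem_sorted _ _ _ _).mp (hR ▸ hx))
    have := List.mem_filter.mp this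
    constructor
    · exact this.1
    · simpa using this.2
  have hpwZ : (L ++ p :: R).Pairwise (· < ·) := by
    rw [List.pairwise_append]
    refine ⟨hL ▸ PySem.List.sorted_ofList_pairwise_lt _, ?_, ?_⟩
    · rw [List.pairwise_cons]
      exact ⟨fun y hy => (hmemR y hy).2, hR ▸ PySem.List.sorted_ofList_pairwise_lt _⟩
    · intro x hx y hy
      rcases List.mem_cons.mp hy with h | h
      · exact h ▸ (hmemL x hx).2
      · exact lt_trans (hmemL x hx).2 (hmemR y h).2
  have hperm : (L ++ p :: R).Perm (PySem.Set.ofList ts) := by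
    rw [List.perm_ext_iff_of_nodup (hpwZ.imp (fun {a b} h => ne_of_lt h)) (PySem.Set.nodup_ofList ts)]
    intro a
    rw [PySem.Set.mem_ofList]
    constructor
    · intro ha
      rcases List.mem_append.mp ha with h | h
      · exact (hmemL a h).1
      · rcases List.mem_cons.mp h with h | h
        · exact h ▸ hp
        · exact (hmemR a h).1
    · intro ha
      rcases lt_trichotomy a p with h | h | h
      · exact List.mem_append.mpr (Or.inl (hL ▸ ((PySem.List.mem_sorted _ _ _ _).mpr
          ((PySem.Set.mem_ofList _ _).mpr (List.mem_filter.mpr ⟨ha, by simpa using h⟩)))))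
      · exact List.mem_append.mpr (Or.inr (List.mem_cons.mpr (Or.inl h)))
      · exact List.mem_append.mpr (Or.inr (List.mem_cons.mpr (Or.inr (hR ▸ ((PySem.List.mem_sorted _ _ _ _).mpr
          ((PySem.Set.mem_ofList _ _).mpr (List.mem_filter.mpr ⟨ha, by simpa using h⟩)))))))
  exact PySem.List.sorted_eq_of_perm_of_pairwise_lt _ _ _ hperm hpwZ

-- MAIN INVARIANT: the carving stack loop produces, per entry, exactly the gap list of the
-- sorted deduplicated frames of that entry inside its range
lemma pvCarveGaps : ∀ (stack : List (Int × Int × List Int)) (out : List (Int × Int)),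
    (∀ e ∈ stack, ∀ x ∈ e.2.2, e.1 ≤ x ∧ x ≤ e.2.1) →
    pvCarve stack out = out ++
      (stack.map (fun e => pvGaps (e.1 - 1) (e.2.1 + 1)
        (PySem.List.sorted (PySem.Set.ofList e.2.2) (fun x => x) false))).flatten := by
  intro stack out hinv
  fun_induction pvCarve stack out with
  | case1 out => simp
  | case2 out lo hi ts st hgt ih =>
    have hts : ts = [] := by
      cases ts with
      | nil => rfl
      | cons a l =>
        have := hinv (lo, hi, a :: l) List.mem_cons_self a List.mem_cons_self
        simp only at this
        omega
    subst hts
    rw [ih (fun e he => hinv e (List.mem_cons_of_mem _ he))]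
    simp [PySem.Set.ofList, show PySem.List.sorted ([] : List Int) (fun x => x) false = [] from rfl,
      pvGaps]
    omega
  | case3 out lo hi st hle ih =>
    rw [ih (fun e he => hinv e (List.mem_cons_of_mem _ he))]
    simp [PySem.Set.ofList, show PySem.List.sorted ([] : List Int) (fun x => x) false = [] from rfl,
      pvGaps, show lo ≤ hi by omega]
  | case4 out lo hi ts st hle hts p ih =>
    have hlen : 0 < ts.length := List.length_pos_iff.mpr hts
    have hp : p = ts.getD (ts.length / 2) 0 := rfl
    have hA : ((ts.attach.filter (fun x => match x with | ⟨t, _⟩ => decide (t < p))).unattach)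
        = ts.filter (fun t => decide (t < p)) := by
      rw [List.unattach_filter (g := fun t => decide (t < p)) (hf := fun x h => rfl),
          List.unattach_attach]
    have hB : ((ts.attach.filter (fun x => match x with | ⟨t, _⟩ => decide (p < t))).unattach)
        = ts.filter (fun t => decide (p < t)) := by
      rw [List.unattach_filter (g := fun t => decide (p < t)) (hf := fun x h => rfl),
          List.unattach_attach]
    rw [hA, hB] at ih
    have hpmem : p ∈ ts := by
      rw [hp, List.getD_eq_getElem ts 0 (by omega : ts.length / 2 < ts.length)]
      exact List.getElem_mem _
    have hbound := hinv (lo, hi, ts) List.mem_cons_self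
    have hinv' : ∀ e ∈ (lo, p - 1, ts.filter (fun t => decide (t < p))) ::
        (p + 1, hi, ts.filter (fun t => decide (p < t))) :: st,
        ∀ x ∈ e.2.2, e.1 ≤ x ∧ x ≤ e.2.1 := by
      intro e he x hx
      rcases List.mem_cons.mp he with h | h
      · subst h
        simp only at hx
        have h1 := List.mem_filter.mp hx
        have h2 := hbound x h1.1
        have h3 : x < p := by simpa using h1.2
        simp only at h2 ⊢
        omega
      · rcases List.mem_cons.mp h with h | h
        · subst h
          simp only at hx
          have h1 := List.mem_filter.mp hx
          have h2 := hbound x h1.1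
          have h3 : p < x := by simpa using h1.2
          simp only at h2 ⊢
          omega
        · exact hinv e (List.mem_cons_of_mem _ h) x hx
    rw [ih hinv']
    have hsplit := pvSortedSplit ts p hpmem
    simp only [List.map_cons, List.flatten_cons, hsplit]
    rw [pvGaps_append]
    simp only [show p - 1 + 1 = p by omega, show p + 1 - 1 = p by omega]
    simp [List.append_assoc]

-- ===== VERDICT =====
theorem non_firefly_frame_ranges_py_spec : Claim_equal_non_firefly_frame_ranges_py := by
  intro n xs _
  unfold Spec_non_firefly_frame_ranges_py
  unfold non_firefly_frame_ranges_py non_firefly_frame_ranges_py_alt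
  by_cases h0 : n ≤ 0
  · simp [h0]
  · simp only [if_neg h0]
    set ts := xs.filter (fun t => decide (0 ≤ t) && decide (t < n)) with hts
    have hinv : ∀ e ∈ [((0 : Int), n - 1, ts)], ∀ x ∈ e.2.2, e.1 ≤ x ∧ x ≤ e.2.1 := by
      intro e he x hx
      rcases List.mem_cons.mp he with h | h
      · subst h
        simp only at hx
        have h1 := List.mem_filter.mp hx
        simp at h1
        simp only
        omega
      · simp at h
    rw [pvCarveGaps _ _ hinv, pvAFold]
    simp [show (0 : Int) - 1 = -1 by omega]
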